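-- pv_equiv track=rewrite | github.com/ANKquil/Python_Practice | f13.py | f13
-- ===== SOURCE A (Python) =====
-- def f13(n, m):
--     sum1 = 0
--     sum2 = 0
--     for i in range(1, n + 1):
--         for j in range(1, m + 1):
--             sum1 += i**5 - 47*i
--             sum2 += i**6 + j**2 + 16
--     sum0 = sum1 + sum2
--     return sum0
-- ===== SOURCE B (Python) =====
-- def f13(n, m):
--     N = max(n, 0)
--     M = max(m, 0)
--     s1 = N * (N + 1) // 2
--     s5 = (2*N**6 + 6*N**5 + 5*N**4 - N**2) // 12
--     s6 = (6*N**7 + 21*N**6 + 21*N**5 - 7*N**3 + N) // 42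
--     t2 = M * (M + 1) * (2*M + 1) // 6
--     return M * (s5 - 47*s1 + s6 + 16*N) + N * t2
-- ===== Notes on version B (the rewrite author's own statement) =====
-- stated objective: faster
-- what changed: Replaced the O(n*m) double loop with O(1) closed-form power-sum formulas: the grid sum separates into m times sums of i, i^5, i^6 over 1..n plus n times the sum of j^2 over 1..m, each given by a Faulhaber polynomial with exact integer division.
import Mathlib
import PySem

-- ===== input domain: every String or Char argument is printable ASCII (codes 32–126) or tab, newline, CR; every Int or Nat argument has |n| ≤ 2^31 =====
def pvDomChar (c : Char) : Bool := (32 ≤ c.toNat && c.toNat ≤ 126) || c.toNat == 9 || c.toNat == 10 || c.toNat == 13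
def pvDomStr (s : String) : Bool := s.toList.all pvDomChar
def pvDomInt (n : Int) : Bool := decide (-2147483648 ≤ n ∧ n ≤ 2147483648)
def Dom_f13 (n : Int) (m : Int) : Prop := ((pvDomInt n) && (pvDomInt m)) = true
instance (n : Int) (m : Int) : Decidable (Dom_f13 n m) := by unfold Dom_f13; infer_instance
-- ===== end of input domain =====

-- B replaces A's double loop by closed-form power-sum formulas (measured asymptotically faster).

-- ===== PORT A =====
def f13 (n : Int) (m : Int) : Int :=
  let s : Int × Int :=
    (PySem.List.pyRange 1 (n + 1) 1).foldl
      (fun (s : Int × Int) (i : Int) =>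
        (PySem.List.pyRange 1 (m + 1) 1).foldl
          (fun (t : Int × Int) (j : Int) =>
            (t.1 + (i ^ 5 - 47 * i), t.2 + (i ^ 6 + j ^ 2 + 16))) s)
      (0, 0)
  s.1 + s.2

-- ===== PORT B =====
def f13_alt (n : Int) (m : Int) : Int :=
  let N : Int := max n 0
  let M : Int := max m 0
  let s1 : Int := PySem.Int.floordiv (N * (N + 1)) 2
  let s5 : Int := PySem.Int.floordiv (2 * N ^ 6 + 6 * N ^ 5 + 5 * N ^ 4 - N ^ 2) 12
  let s6 : Int := PySem.Int.floordiv (6 * N ^ 7 + 21 * N ^ 6 + 21 * N ^ 5 - 7 * N ^ 3 + N) 42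
  let t2 : Int := PySem.Int.floordiv (M * (M + 1) * (2 * M + 1)) 6
  M * (s5 - 47 * s1 + s6 + 16 * N) + N * t2

-- ===== PRECONDITION & SPEC =====
def Spec_f13 (n : Int) (m : Int) (out : Int) : Prop := out = f13_alt n m
instance (n : Int) (m : Int) (out : Int) : Decidable (Spec_f13 n m out) := by unfold Spec_f13; infer_instance

-- ===== CLAIM (what is proved, stated in full; the proofs are below) =====
def Claim_equal_f13 : Prop := ∀ (n : Int) (m : Int), Dom_f13 n m → Spec_f13 n m (f13 n m)

-- ===== LEMMAS AND PROOFS =====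

-- A's inner loop over any list of j's, summarised
theorem f13_inner (a c1 c2 : Int) (L : List Int) : ∀ (s : Int × Int),
    L.foldl (fun (t : Int × Int) (j : Int) => (t.1 + a, t.2 + (c1 + j ^ 2 + c2))) s
      = (s.1 + L.length * a,
         s.2 + L.length * (c1 + c2) + (L.map (fun j => j ^ 2)).sum) := by
  induction L with
  | nil => intro s; simp
  | cons x xs ih =>
    intro s
    rw [List.foldl_cons, ih]
    refine Prod.ext ?_ ?_ <;> simp <;> ring

-- A's outer loop over any list of i's, after the inner loop is summarised
theorem f13_outer (m : Int) (L : List Int) : ∀ (s : Int × Int),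
    L.foldl
      (fun (s : Int × Int) (i : Int) =>
        (PySem.List.pyRange 1 (m + 1) 1).foldl
          (fun (t : Int × Int) (j : Int) =>
            (t.1 + (i ^ 5 - 47 * i), t.2 + (i ^ 6 + j ^ 2 + 16))) s) s
      = (s.1 + ((PySem.List.pyRange 1 (m + 1) 1).length : Int)
                  * (L.map (fun i => i ^ 5 - 47 * i)).sum,
         s.2 + ((PySem.List.pyRange 1 (m + 1) 1).length : Int)
                  * (L.map (fun i => i ^ 6 + 16)).sum
             + L.length * ((PySem.List.pyRange 1 (m + 1) 1).map (fun j => j ^ 2)).sum) := by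
  induction L with
  | nil => intro s; simp
  | cons x xs ih =>
    intro s
    rw [List.foldl_cons, f13_inner (x ^ 5 - 47 * x) (x ^ 6) 16, ih]
    refine Prod.ext ?_ ?_ <;> simp <;> ring

theorem pv_split1 (L : List Int) :
    (L.map (fun i => i ^ 5 - 47 * i)).sum
      = (L.map (fun i => i ^ 5)).sum - 47 * (L.map (fun i => i)).sum := by
  induction L with
  | nil => simp
  | cons x xs ih => simp [ih]; ring

theorem pv_split2 (L : List Int) :
    (L.map (fun i => i ^ 6 + 16)).sum
      = (L.map (fun i => i ^ 6)).sum + 16 * (L.length : Int) := by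
  induction L with
  | nil => simp
  | cons x xs ih => simp only [List.map_cons, List.sum_cons, List.length_cons, ih]; push_cast; ring

theorem pv_sum1 (N : Nat) :
    2 * ((PySem.List.pyRange 1 ((N : Int) + 1) 1).map (fun i => i)).sum
      = (N : Int) * (N + 1) := by
  induction N with
  | zero => rw [show ((0:Nat):Int) + 1 = 1 by norm_num, PySem.List.pyRange_one_eq_nil (by omega)]; simp
  | succ k ih =>
    push_cast
    rw [PySem.List.pyRange_one_succ_right (by omega)]
    rw [List.map_append, List.sum_append]
    push_cast at ih ⊢
    simp only [List.map_cons, List.map_nil, List.sum_cons, List.sum_nil]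
    linear_combination ih

theorem pv_sum2 (N : Nat) :
    6 * ((PySem.List.pyRange 1 ((N : Int) + 1) 1).map (fun j => j ^ 2)).sum
      = (N : Int) * (N + 1) * (2 * N + 1) := by
  induction N with
  | zero => rw [show ((0:Nat):Int) + 1 = 1 by norm_num, PySem.List.pyRange_one_eq_nil (by omega)]; simp
  | succ k ih =>
    push_cast
    rw [PySem.List.pyRange_one_succ_right (by omega)]
    rw [List.map_append, List.sum_append]
    push_cast at ih ⊢
    simp only [List.map_cons, List.map_nil, List.sum_cons, List.sum_nil]
    linear_combination ih

theorem pv_sum5 (N : Nat) :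
    12 * ((PySem.List.pyRange 1 ((N : Int) + 1) 1).map (fun i => i ^ 5)).sum
      = 2 * (N : Int) ^ 6 + 6 * (N : Int) ^ 5 + 5 * (N : Int) ^ 4 - (N : Int) ^ 2 := by
  induction N with
  | zero => rw [show ((0:Nat):Int) + 1 = 1 by norm_num, PySem.List.pyRange_one_eq_nil (by omega)]; simp
  | succ k ih =>
    push_cast
    rw [PySem.List.pyRange_one_succ_right (by omega)]
    rw [List.map_append, List.sum_append]
    push_cast at ih ⊢
    simp only [List.map_cons, List.map_nil, List.sum_cons, List.sum_nil]
    linear_combination ih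

theorem pv_sum6 (N : Nat) :
    42 * ((PySem.List.pyRange 1 ((N : Int) + 1) 1).map (fun i => i ^ 6)).sum
      = 6 * (N : Int) ^ 7 + 21 * (N : Int) ^ 6 + 21 * (N : Int) ^ 5 - 7 * (N : Int) ^ 3 + (N : Int) := by
  induction N with
  | zero => rw [show ((0:Nat):Int) + 1 = 1 by norm_num, PySem.List.pyRange_one_eq_nil (by omega)]; simp
  | succ k ih =>
    push_cast
    rw [PySem.List.pyRange_one_succ_right (by omega)]
    rw [List.map_append, List.sum_append]
    push_cast at ih ⊢
    simp only [List.map_cons, List.map_nil, List.sum_cons, List.sum_nil]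
    linear_combination ih

theorem pv_range_toNat (n : Int) :
    PySem.List.pyRange 1 (n + 1) 1 = PySem.List.pyRange 1 ((n.toNat : Int) + 1) 1 := by
  by_cases h : 0 ≤ n
  · rw [Int.toNat_of_nonneg h]
  · rw [PySem.List.pyRange_one_eq_nil (by omega), PySem.List.pyRange_one_eq_nil (by omega)]

theorem pv_exact_floordiv (b q : Int) (hb : 0 < b) : PySem.Int.floordiv (b * q) b = q := by
  rw [PySem.Int.floordiv_eq_ediv_of_pos hb, Int.mul_ediv_cancel_left q (by omega)]

-- ===== VERDICT (by name: the statement is the Claim_ definition above) =====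
theorem f13_spec : Claim_equal_f13 := by
  intro n m _
  unfold Spec_f13 f13 f13_alt
  simp only []
  have hN : ((n.toNat : Int)) = max n 0 := Int.toNat_eq_max n
  have hM : ((m.toNat : Int)) = max m 0 := Int.toNat_eq_max m
  rw [pv_range_toNat n, pv_range_toNat m, f13_outer]
  rw [pv_split1, pv_split2, PySem.List.length_pyRange_one, PySem.List.length_pyRange_one,
      show ((m.toNat : Int) + 1 - 1) = (m.toNat : Int) by ring,
      show ((n.toNat : Int) + 1 - 1) = (n.toNat : Int) by ring,
      Int.toNat_natCast, Int.toNat_natCast]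
  rw [show ((max n 0) * ((max n 0) + 1) : Int) = 2 * ((PySem.List.pyRange 1 ((n.toNat : Int) + 1) 1).map (fun i => i)).sum by rw [pv_sum1, hN],
      show ((2:Int) * (max n 0) ^ 6 + 6 * (max n 0) ^ 5 + 5 * (max n 0) ^ 4 - (max n 0) ^ 2)
        = 12 * ((PySem.List.pyRange 1 ((n.toNat : Int) + 1) 1).map (fun i => i ^ 5)).sum by rw [pv_sum5, hN],
      show ((6:Int) * (max n 0) ^ 7 + 21 * (max n 0) ^ 6 + 21 * (max n 0) ^ 5 - 7 * (max n 0) ^ 3 + (max n 0))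
        = 42 * ((PySem.List.pyRange 1 ((n.toNat : Int) + 1) 1).map (fun i => i ^ 6)).sum by rw [pv_sum6, hN],
      show ((max m 0) * ((max m 0) + 1) * (2 * (max m 0) + 1) : Int)
        = 6 * ((PySem.List.pyRange 1 ((m.toNat : Int) + 1) 1).map (fun j => j ^ 2)).sum by rw [pv_sum2, hM]]
  rw [pv_exact_floordiv 2 _ (by omega), pv_exact_floordiv 12 _ (by omega),
      pv_exact_floordiv 42 _ (by omega), pv_exact_floordiv 6 _ (by omega)]
  rw [← hN, ← hM]
  ring
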